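-- pv_equiv track=rewrite | github.com/bluewin4/dream-research | flows/core/information_detection.py | _extract_information_space
-- ===== SOURCE A (Python) =====
-- from typing import Set, List
--
-- def _extract_information_space(text: str) -> Set[str]:
--     """Extract information space from text
--
--     Implements information space extraction following formalization:
--     I_data that can be derived from r_i or o_i
--     """
--     # Split into semantic units
--     words = text.split()
--     information_space = set()
--
--     # Extract key information markers
--     current_concept = []
--     for word in words:
--         if word.lower() in {'is', 'are', 'be', '.', ',', ';'}:
--             if current_concept:
--                 information_space.add(' '.join(current_concept))
--                 current_concept = []
--         else:
--             current_concept.append(word)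
--
--     # Add final concept if exists
--     if current_concept:
--         information_space.add(' '.join(current_concept))
--
--     return information_space
-- ===== SOURCE B (Python) =====
-- def _extract_information_space(text: str):
--     """Extract information space from text (run-splitting re-implementation)."""
--     seps = {'is', 'are', 'be', '.', ',', ';'}
--     words = text.split()
--     concepts = set()
--     while words:
--         if words[0].lower() in seps:
--             words = words[1:]
--         else:
--             k = 0
--             while k < len(words) and words[k].lower() not in seps:
--                 k += 1
--             concepts.add(' '.join(words[:k]))
--             words = words[k:]
--     return concepts
-- ===== Notes on version B (the rewrite author's own statement) =====
-- stated objective: alternative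
-- what changed: A maintains a current_concept accumulator mutated word by word with a trailing flush; B instead consumes the word list run by run: it drops leading separators and, for each maximal separator-free run, measures its length k and adds the join of words[:k] in one step, so no accumulator or final flush exists.
import Mathlib
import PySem

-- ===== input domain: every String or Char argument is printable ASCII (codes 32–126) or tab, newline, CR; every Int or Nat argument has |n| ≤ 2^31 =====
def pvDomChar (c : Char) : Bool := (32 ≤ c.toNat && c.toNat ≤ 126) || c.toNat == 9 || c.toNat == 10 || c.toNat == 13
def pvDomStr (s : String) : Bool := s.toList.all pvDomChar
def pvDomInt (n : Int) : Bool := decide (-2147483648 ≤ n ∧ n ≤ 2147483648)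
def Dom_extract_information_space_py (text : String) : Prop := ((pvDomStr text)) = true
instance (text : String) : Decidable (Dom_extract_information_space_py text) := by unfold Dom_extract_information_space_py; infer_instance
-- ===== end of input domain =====

-- B replaces A's word-by-word current_concept accumulator (with trailing flush) by a
-- run-by-run scan that slices off each maximal separator-free run in one step; alternative
-- decomposition, same cost, return value proved equal (A returns a set; both ports build
-- the PySem.Set in first-insertion order).

-- ===== PORT A =====
def sepA (w : String) : Bool := ["is", "are", "be", ".", ",", ";"].contains (PySem.Str.lower w)

def extract_information_space_py (text : String) : List String :=
  let words := PySem.Str.split₀ text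
  let st := words.foldl
    (fun (st : List String × List String) word =>
      if sepA word then
        if st.2.isEmpty then st
        else (PySem.Set.add st.1 (PySem.Str.join " " st.2), ([] : List String))
      else (st.1, st.2 ++ [word]))
    (PySem.Set.empty, ([] : List String))
  if st.2.isEmpty then st.1 else PySem.Set.add st.1 (PySem.Str.join " " st.2)

-- ===== PORT B =====
def sepB (w : String) : Bool := ["is", "are", "be", ".", ",", ";"].contains (PySem.Str.lower w)

-- Source B's outer while: drop one leading separator, or slice off the maximal
-- separator-free prefix (the inner while computing k + words[:k]/words[k:]
-- is exactly takeWhile/dropWhile of the non-separator predicate).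
def bLoop (acc : List String) : List String → List String
  | [] => acc
  | w :: ws =>
    if h : sepB w then bLoop acc ws
    else
      bLoop (PySem.Set.add acc (PySem.Str.join " " ((w :: ws).takeWhile (fun x => !sepB x))))
            ((w :: ws).dropWhile (fun x => !sepB x))
termination_by ws => ws.length
decreasing_by
  · simp
  · have hw : (fun x => !sepB x) w = true := by simp [h]
    rw [List.dropWhile_cons, if_pos hw]
    have := List.length_dropWhile_le (fun x => !sepB x) ws
    simp only [List.length_cons]
    omega

def extract_information_space_py_alt (text : String) : List String :=
  bLoop PySem.Set.empty (PySem.Str.split₀ text)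

-- ===== PRECONDITION & SPEC =====
def Spec_extract_information_space_py (text : String) (out : List String) : Prop := out = extract_information_space_py_alt text
instance (text : String) (out : List String) : Decidable (Spec_extract_information_space_py text out) := by unfold Spec_extract_information_space_py; infer_instance

-- ===== CLAIM (what is proved, stated in full; the proofs are below) =====
def Claim_equal_extract_information_space_py : Prop := ∀ (text : String), Dom_extract_information_space_py text → Spec_extract_information_space_py text (extract_information_space_py text)

-- ===== LEMMAS AND PROOFS =====

-- A's loop step
def aStep (st : List String × List String) (word : String) : List String × List String :=
  if sepA word then
    if st.2.isEmpty then st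
    else (PySem.Set.add st.1 (PySem.Str.join " " st.2), ([] : List String))
  else (st.1, st.2 ++ [word])

-- A's trailing flush
def aFin (st : List String × List String) : List String :=
  if st.2.isEmpty then st.1 else PySem.Set.add st.1 (PySem.Str.join " " st.2)

-- generalized B-side value for a pending current run `cur`
def G (acc : List String) (cur : List String) (ws : List String) : List String :=
  let run := cur ++ ws.takeWhile (fun x => !sepB x)
  let rest := ws.dropWhile (fun x => !sepB x)
  if run.isEmpty then bLoop acc rest
  else bLoop (PySem.Set.add acc (PySem.Str.join " " run)) rest

lemma G_nil (acc : List String) (ws : List String) : G acc [] ws = bLoop acc ws := by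
  cases ws with
  | nil => simp [G, bLoop]
  | cons w t =>
    by_cases h : sepB w
    · simp [G, List.takeWhile_cons, List.dropWhile_cons, h]
    · rw [G]
      simp only [List.nil_append]
      rw [if_neg (by simp [List.takeWhile_cons, h])]
      conv_rhs => rw [bLoop]
      rw [dif_neg h]

lemma loop_eq (ws : List String) (acc cur : List String) :
    aFin (ws.foldl aStep (acc, cur)) = G acc cur ws := by
  induction ws generalizing acc cur with
  | nil =>
    simp only [List.foldl_nil, aFin, G, List.takeWhile_nil, List.dropWhile_nil, List.append_nil]
    by_cases h : cur.isEmpty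
    · simp [h, bLoop]
    · simp [h, bLoop]
  | cons w t ih =>
    by_cases h : sepB w
    · have hstep : aStep (acc, cur) w =
        (if cur.isEmpty then acc
         else PySem.Set.add acc (PySem.Str.join " " cur), if cur.isEmpty then cur else []) := by
        simp only [aStep, sepA, sepB] at *
        rw [if_pos h]
        by_cases hc : cur.isEmpty
        · simp [hc]
        · simp [hc]
      have hcur0 : (if cur.isEmpty then cur else ([] : List String)) = [] := by
        by_cases hc : cur.isEmpty
        · simpa using hc
        · simp [hc]
      rw [List.foldl_cons, hstep, hcur0, ih, G_nil]
      rw [G]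
      simp only [List.takeWhile_cons, List.dropWhile_cons]
      simp only [h, Bool.not_true, Bool.false_eq_true, if_false, List.append_nil]
      by_cases hc : cur.isEmpty
      · simp only [hc, if_true]
        rw [bLoop, dif_pos h]
      · simp only [hc, Bool.false_eq_true, if_false]
        rw [bLoop, dif_pos h]
    · have hstep : aStep (acc, cur) w = (acc, cur ++ [w]) := by
        simp only [aStep, sepA, sepB] at *
        rw [if_neg h]
      rw [List.foldl_cons, hstep, ih]
      rw [G, G]
      simp only [List.takeWhile_cons, List.dropWhile_cons]
      simp only [Bool.not_eq_eq_eq_not, Bool.not_true] at h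
      simp [h, List.append_assoc]

-- ===== VERDICT (by name: the statement is the Claim_ definition above) =====
theorem extract_information_space_py_spec : Claim_equal_extract_information_space_py := by
  intro text _
  show extract_information_space_py text = extract_information_space_py_alt text
  have := loop_eq (PySem.Str.split₀ text) PySem.Set.empty []
  rw [G_nil] at this
  exact this
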